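-- pv_equiv track=rewrite | github.com/Wentao900/R3-DiffTS-edit | main_model.py | _build_band_slices
-- ===== SOURCE A (Python) =====
-- def _build_band_slices(boundaries, pred_len):
--     if not boundaries:
--         return []
--     valid_boundaries = sorted({min(max(int(boundary), 1), pred_len) for boundary in boundaries})
--     if valid_boundaries[-1] != pred_len:
--         valid_boundaries.append(pred_len)
--     slices = []
--     start = 0
--     for end in valid_boundaries:
--         if end > start:
--             slices.append((start, end))
--             start = end
--     return slices
-- ===== SOURCE B (Python) =====
-- def _build_band_slices(boundaries, pred_len):
--     if not boundaries:
--         return []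
--     clamped = [min(max(int(b), 1), pred_len) for b in boundaries]
--     slices = []
--     start = 0
--     while start < pred_len:
--         end = min((c for c in clamped if c > start), default=pred_len)
--         slices.append((start, end))
--         start = end
--     return slices
-- ===== Notes on version B (the rewrite author's own statement) =====
-- stated objective: alternative
-- what changed: Replaces A's sort/dedupe/append/pair pipeline by repeated selection: a while loop that from cut 0 repeatedly takes the minimum clamped boundary above the current cut (pred_len when none remains) until pred_len is reached, with no sorting and no set.
import Mathlib
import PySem

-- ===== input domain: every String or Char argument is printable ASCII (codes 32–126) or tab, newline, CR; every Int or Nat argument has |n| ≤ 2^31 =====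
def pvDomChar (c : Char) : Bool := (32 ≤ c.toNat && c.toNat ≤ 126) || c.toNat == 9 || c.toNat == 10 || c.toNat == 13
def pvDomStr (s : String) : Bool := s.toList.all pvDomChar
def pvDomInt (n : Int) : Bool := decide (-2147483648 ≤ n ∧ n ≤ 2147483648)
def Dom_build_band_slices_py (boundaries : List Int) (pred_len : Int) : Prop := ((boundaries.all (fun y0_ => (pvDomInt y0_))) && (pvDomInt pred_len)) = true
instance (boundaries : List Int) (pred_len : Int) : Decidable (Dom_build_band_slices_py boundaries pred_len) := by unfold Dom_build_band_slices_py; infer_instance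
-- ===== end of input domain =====

-- B replaces A's sort/dedupe/pair pipeline by repeated selection: starting at 0 it repeatedly
-- takes the smallest clamped boundary above the current cut (pred_len when none remains)
-- until pred_len is reached — no sorting and no set (objective: alternative).

-- ===== PORT A =====
def build_band_slices_py (boundaries : List Int) (pred_len : Int) : List (Int × Int) :=
  if boundaries = [] then []
  else
    let valid := PySem.List.sorted
      (PySem.Set.ofList (boundaries.map (fun b => min (max b 1) pred_len))) (fun x => x) false
    -- valid_boundaries[-1] != pred_len: valid is nonempty here, so [-1] is its last element
    let vb := if valid.getLast? = some pred_len then valid else valid ++ [pred_len]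
    (vb.foldl (fun st e => if st.2 < e then (st.1 ++ [(st.2, e)], e) else st)
      (([] : List (Int × Int)), (0 : Int))).1

-- ===== PORT B =====
-- min((c for c in clamped if c > start), default=pred_len)
def bandNext (clamped : List Int) (pred_len start : Int) : Int :=
  match (clamped.filter (fun c => start < c)).min? with
  | some m => m
  | none => pred_len

-- termination fact for the while loop: the next cut-point is strictly above the current one
-- List.min? characterisation on Int
lemma min?_spec (l : List Int) (a : Int) (h : l.min? = some a) : a ∈ l ∧ ∀ b ∈ l, a ≤ b := by
  rw [List.min?_eq_some_iff] at h
  exact h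

lemma bandNext_gt (clamped : List Int) (pred_len start : Int) (h : start < pred_len) :
    start < bandNext clamped pred_len start := by
  cases hm : (clamped.filter (fun c => start < c)).min? with
  | none => simpa [bandNext, hm] using h
  | some m =>
    have hmem : m ∈ clamped.filter (fun c => start < c) := (min?_spec _ _ hm).1
    have : start < m := by simpa using (List.mem_filter.mp hmem).2
    simpa [bandNext, hm] using this

-- the while loop of B
def bandLoop (clamped : List Int) (pred_len start : Int) : List (Int × Int) :=
  if h : start < pred_len then
    (start, bandNext clamped pred_len start) ::
      bandLoop clamped pred_len (bandNext clamped pred_len start)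
  else []
termination_by (pred_len - start).toNat
decreasing_by
  have := bandNext_gt clamped pred_len start h
  omega

def build_band_slices_py_alt (boundaries : List Int) (pred_len : Int) : List (Int × Int) :=
  if boundaries = [] then []
  else bandLoop (boundaries.map (fun b => min (max b 1) pred_len)) pred_len 0

-- ===== PRECONDITION & SPEC =====
def Spec_build_band_slices_py (boundaries : List Int) (pred_len : Int) (out : List (Int × Int)) : Prop := out = build_band_slices_py_alt boundaries pred_len
instance (boundaries : List Int) (pred_len : Int) (out : List (Int × Int)) : Decidable (Spec_build_band_slices_py boundaries pred_len out) := by unfold Spec_build_band_slices_py; infer_instance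

-- ===== CLAIM (what is proved, stated in full; the proofs are below) =====
def Claim_equal_build_band_slices_py : Prop := ∀ (boundaries : List Int) (pred_len : Int), Dom_build_band_slices_py boundaries pred_len → Spec_build_band_slices_py boundaries pred_len (build_band_slices_py boundaries pred_len)

-- ===== LEMMAS AND PROOFS =====

-- the canonical pairing of consecutive cut-points both programs produce
def pairList (start : Int) : List Int → List (Int × Int)
  | [] => []
  | h :: t => (start, h) :: pairList h t

-- the last element of a strictly increasing list containing p with all elements ≤ p is p
lemma getLast_eq_of_mem_max (l : List Int) (p : Int)
    (hp : p ∈ l) (hle : ∀ x ∈ l, x ≤ p) (hsort : l.Pairwise (· < ·)) :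
    l.getLast? = some p := by
  induction l with
  | nil => cases hp
  | cons h t ih =>
    rcases List.pairwise_cons.mp hsort with ⟨hlt, ht⟩
    cases t with
    | nil =>
      simp only [List.mem_cons, List.not_mem_nil, or_false] at hp
      simp [hp]
    | cons h2 t2 =>
      have hrec : (h2 :: t2).getLast? = some p := by
        apply ih
        · rcases List.mem_cons.mp hp with rfl | hm
          · exact absurd (hle h2 (by simp)) (not_le.mpr (hlt h2 (by simp)))
          · exact hm
        · intro x hx; exact hle x (List.mem_cons_of_mem _ hx)
        · exact ht
      simpa [List.getLast?_cons_cons] using hrec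

-- A's loop over a strictly increasing list whose elements all exceed the start
-- appends every adjacent pair, i.e. produces pairList
lemma loop_eq_pairList (l : List Int) (acc : List (Int × Int)) (s : Int)
    (hsort : l.Pairwise (· < ·)) (hgt : ∀ x ∈ l, s < x) :
    (l.foldl (fun st e => if st.2 < e then (st.1 ++ [(st.2, e)], e) else st) (acc, s)).1
      = acc ++ pairList s l := by
  induction l generalizing acc s with
  | nil => simp [pairList]
  | cons h t ih =>
    rcases List.pairwise_cons.mp hsort with ⟨hlt, ht⟩
    have hsh : s < h := hgt h (by simp)
    rw [List.foldl_cons, if_pos hsh, ih (acc ++ [(s, h)]) h ht hlt]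
    simp [pairList]

-- B's while loop produces pairList of any strictly increasing list l that ends in p,
-- lies entirely in (start, p], contains every clamped value above start, and whose
-- elements are clamped values or p
lemma bandLoop_eq_pairList (clamped : List Int) (p : Int) (l : List Int) :
    ∀ start, l.Pairwise (· < ·) → l.getLast? = some p →
    (∀ x ∈ l, start < x ∧ x ≤ p) →
    (∀ c ∈ clamped, start < c → c ∈ l) →
    (∀ x ∈ l, x = p ∨ x ∈ clamped) →
    bandLoop clamped p start = pairList start l := by
  induction l with
  | nil => intro start _ hlast _ _ _; cases hlast
  | cons h t ih =>
    intro start hsort hlast hrange hall hfrom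
    rcases List.pairwise_cons.mp hsort with ⟨hlt, ht⟩
    obtain ⟨hsh, hhp⟩ := hrange h (by simp)
    have hsp : start < p := lt_of_lt_of_le hsh hhp
    have hnext : bandNext clamped p start = h := by
      cases hm : (clamped.filter (fun c => start < c)).min? with
      | some m =>
        obtain ⟨hmem, hmin⟩ := min?_spec _ _ hm
        have hmc : m ∈ clamped := (List.mem_filter.mp hmem).1
        have hsm : start < m := by simpa using (List.mem_filter.mp hmem).2
        have hml : m ∈ h :: t := hall m hmc hsm
        have hhm : h ≤ m := by
          rcases List.mem_cons.mp hml with rfl | hmt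
          · exact le_refl _
          · exact le_of_lt (hlt m hmt)
        have hmh : m = h := by
          rcases hfrom h (by simp) with rfl | hhc
          · -- h = p: m lies in h :: t so m ≤ p = h, and h ≤ m
            have := (hrange m hml).2
            omega
          · have hmle : m ≤ h := hmin h (List.mem_filter.mpr ⟨hhc, by simpa using hsh⟩)
            omega
        simp [bandNext, hm, hmh]
      | none =>
        -- filter empty: h itself is not a clamped value above start, so h = p
        rcases hfrom h (by simp) with rfl | hhc
        · simp [bandNext, hm]
        · exfalso
          have : h ∈ clamped.filter (fun c => start < c) :=
            List.mem_filter.mpr ⟨hhc, by simpa using hsh⟩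
          rw [List.min?_eq_none_iff.mp hm] at this
          exact absurd this (List.not_mem_nil)
    rw [bandLoop, dif_pos hsp, hnext]
    simp only [pairList, List.cons.injEq, true_and]
    cases t with
    | nil =>
      have hhp' : h = p := by simpa using hlast
      rw [bandLoop, dif_neg (by omega)]
      rfl
    | cons h2 t2 =>
      apply ih h ht (by simpa [List.getLast?_cons_cons] using hlast)
      · intro x hx
        exact ⟨hlt x hx, (hrange x (List.mem_cons_of_mem _ hx)).2⟩
      · intro c hc hhc
        have : c ∈ h :: h2 :: t2 := hall c hc (lt_trans hsh hhc)
        rcases List.mem_cons.mp this with rfl | hct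
        · omega
        · exact hct
      · intro x hx
        exact hfrom x (List.mem_cons_of_mem _ hx)

-- ===== VERDICT (by name: the statement is the Claim_ definition above) =====

theorem build_band_slices_py_spec : Claim_equal_build_band_slices_py := by
  intro bs p _
  unfold Spec_build_band_slices_py build_band_slices_py build_band_slices_py_alt
  by_cases hb : bs = []
  · simp [hb]
  · simp only [if_neg hb]
    set clamped := bs.map (fun b => min (max b 1) p) with hcl
    have hle : ∀ x ∈ PySem.Set.ofList clamped, x ≤ p := by
      intro x hx
      rw [PySem.Set.mem_ofList _ _] at hx
      obtain ⟨b, hbmem, rfl⟩ := List.mem_map.mp hx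
      exact min_le_right _ _
    set L := PySem.List.sorted (PySem.Set.ofList clamped) (fun x => x) false with hLdef
    have hLlt : L.Pairwise (· < ·) := PySem.List.sorted_ofList_pairwise_lt _
    have hLmem : ∀ x, x ∈ L ↔ x ∈ clamped := by
      intro x
      rw [hLdef, PySem.List.mem_sorted, PySem.Set.mem_ofList]
    have hLle : ∀ x ∈ L, x ≤ p := by
      intro x hx
      exact hle x ((PySem.List.mem_sorted _ _ _ _).mp hx)
    set vb := if L.getLast? = some p then L else L ++ [p] with hvb
    have hvblt : vb.Pairwise (· < ·) := by
      rw [hvb]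
      split_ifs with hlast
      · exact hLlt
      · rw [List.pairwise_append]
        refine ⟨hLlt, by simp, fun x hx y hy => ?_⟩
        simp only [List.mem_singleton] at hy
        rw [hy]
        refine lt_of_le_of_ne (hLle x hx) (fun hxp => hlast ?_)
        exact getLast_eq_of_mem_max L p (hxp ▸ hx) hLle hLlt
    have hvbmem : ∀ x, x ∈ vb ↔ (x ∈ L ∨ x = p) := by
      intro x
      rw [hvb]
      split_ifs with hlast
      · constructor
        · exact Or.inl
        · rintro (h | rfl)
          · exact h
          · exact List.mem_of_getLast? hlast
      · simp
    have hvblast : vb.getLast? = some p := by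
      rw [hvb]
      split_ifs with hlast
      · exact hlast
      · cases L with
        | nil => rfl
        | cons a t => rw [List.getLast?_append]; rfl
    by_cases hp1 : 1 ≤ p
    · have hclge : ∀ c ∈ clamped, (1 : Int) ≤ c := by
        intro c hc
        obtain ⟨b, _, rfl⟩ := List.mem_map.mp hc
        exact le_min (le_max_right _ _) hp1
      have hpos : ∀ x ∈ vb, (0 : Int) < x ∧ x ≤ p := by
        intro x hx
        rcases (hvbmem x).mp hx with h | rfl
        · have := hclge x ((hLmem x).mp h)
          exact ⟨by omega, hLle x h⟩
        · omega
      rw [loop_eq_pairList vb [] 0 hvblt (fun x hx => (hpos x hx).1)]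
      rw [bandLoop_eq_pairList clamped p vb 0 hvblt hvblast hpos
        (fun c hc _ => (hvbmem c).mpr (Or.inl ((hLmem c).mpr hc)))
        (fun x hx => ((hvbmem x).mp hx).symm.imp id (hLmem x).mp)]
      simp
    · -- pred_len ≤ 0: every clamped boundary equals pred_len; A's filter drops all, B's loop never runs
      have hvble : ∀ x ∈ vb, x ≤ p := by
        intro x hx
        rcases (hvbmem x).mp hx with h | rfl
        · exact hLle x h
        · exact le_refl _
      have hA : (vb.foldl (fun st e => if st.2 < e then (st.1 ++ [(st.2, e)], e) else st)
          (([] : List (Int × Int)), (0 : Int))).1 = [] := by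
        have : ∀ m : List Int, (∀ x ∈ m, x ≤ p) →
            (m.foldl (fun st e => if st.2 < e then (st.1 ++ [(st.2, e)], e) else st)
              (([] : List (Int × Int)), (0 : Int))).1 = [] := by
          intro m
          induction m with
          | nil => intro _; rfl
          | cons h t ih =>
            intro hm
            have : ¬ ((0 : Int) < h) := by
              have := hm h (by simp)
              omega
            simp only [List.foldl_cons, if_neg this]
            exact ih (fun x hx => hm x (List.mem_cons_of_mem _ hx))
        exact this vb hvble
      rw [hA, bandLoop, dif_neg (by omega)]
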